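-- pv_equiv track=rewrite | github.com/sleepyhood/learning-tracker-api | app.py | get_progress
-- ===== SOURCE A (Python) =====
-- from collections import defaultdict
--
-- def get_progress(solved_list, problem_info):
--     progress = defaultdict(int)
--     for pid in solved_list:
--         for prefix, info in problem_info.items():
--             if pid.startswith(prefix):
--                 progress[info["title"]] += 1
--                 break
--     return progress
-- ===== SOURCE B (Python) =====
-- def get_progress(solved_list, problem_info):
--     # Index the prefixes once: first-occurrence priority per prefix, plus the
--     # list of distinct prefix lengths; each pid then does one dict lookup per
--     # distinct length and keeps the hit with the smallest insertion index.
--     table = {}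
--     lengths = []
--     for i, (prefix, info) in enumerate(problem_info.items()):
--         if prefix not in table:
--             table[prefix] = (i, info)
--             if len(prefix) not in lengths:
--                 lengths.append(len(prefix))
--     counts = {}
--     for pid in solved_list:
--         best = None
--         for L in lengths:
--             if L <= len(pid):
--                 hit = table.get(pid[:L])
--                 if hit is not None and (best is None or hit[0] < best[0]):
--                     best = hit
--         if best is not None:
--             title = best[1]["title"]
--             counts[title] = counts.get(title, 0) + 1
--     return counts
-- ===== Notes on version B (the rewrite author's own statement) =====
-- stated objective: faster
-- what changed: Instead of scanning all of problem_info for every pid, B builds once a prefix -> (insertion index, info) table plus the list of distinct prefix lengths, then resolves each pid with one hash lookup per distinct length, keeping the minimum-index hit (= A's first match).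
import Mathlib
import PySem

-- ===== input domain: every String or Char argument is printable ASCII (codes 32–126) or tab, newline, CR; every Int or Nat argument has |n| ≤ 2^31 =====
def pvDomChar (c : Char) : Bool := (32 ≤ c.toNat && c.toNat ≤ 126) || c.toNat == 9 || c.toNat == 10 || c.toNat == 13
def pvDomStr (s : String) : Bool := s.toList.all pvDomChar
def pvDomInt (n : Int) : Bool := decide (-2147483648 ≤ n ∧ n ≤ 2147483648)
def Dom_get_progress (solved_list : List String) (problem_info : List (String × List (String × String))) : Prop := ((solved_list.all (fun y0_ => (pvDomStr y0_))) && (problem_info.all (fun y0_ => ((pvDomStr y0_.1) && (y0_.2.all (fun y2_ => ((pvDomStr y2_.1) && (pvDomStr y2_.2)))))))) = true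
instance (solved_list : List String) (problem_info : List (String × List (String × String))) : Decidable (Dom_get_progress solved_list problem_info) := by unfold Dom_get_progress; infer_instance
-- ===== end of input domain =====

-- B replaces A's per-pid scan of all of problem_info by a prefix index built once
-- (prefix -> (insertion index, info), plus the distinct prefix lengths); per pid one
-- dict lookup per distinct length, keeping the minimum-index hit.  Objective: faster.

-- info["title"]: first-match lookup in the inner dict (Python dicts have unique keys);
-- 'none' is exactly where Python raises KeyError (those inputs are outside Pre_).
def lookupTitle (info : List (String × String)) : Option String :=
  (info.find? (fun kv => kv.1 == "title")).map Prod.snd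

-- ===== PORT A =====
-- the inner 'for prefix, info in problem_info.items(): if pid.startswith(prefix): …; break'
-- visits entries in order and stops at the first match, i.e. List.find?
def get_progress_stepA (problem_info : List (String × List (String × String)))
    (progress : PySem.Dict String Int) (pid : String) : PySem.Dict String Int :=
  match problem_info.find? (fun e => PySem.Str.startswith pid e.1) with
  | some e =>
    match lookupTitle e.2 with
    | some t => progress.insert t (progress.getD t 0 + 1)   -- progress[title] += 1 (defaultdict)
    | none => progress   -- Python raises KeyError here; outside Pre_
  | none => progress

def get_progress (solved_list : List String) (problem_info : List (String × List (String × String))) : List (String × Int) :=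
  (solved_list.foldl (get_progress_stepA problem_info) PySem.Dict.empty).items

-- ===== PORT B =====
-- Source B's first loop: table (first-occurrence priority) and the distinct prefix lengths
def gpIndex (problem_info : List (String × List (String × String))) :
    PySem.Dict String (Int × List (String × String)) × List Int :=
  (PySem.List.enumerate problem_info 0).foldl
    (fun st e =>
      if st.1.contains e.2.1 then st
      else (st.1.insert e.2.1 (e.1, e.2.2),
            if st.2.contains (PySem.Str.len e.2.1) then st.2
            else st.2 ++ [PySem.Str.len e.2.1]))
    (PySem.Dict.empty, [])

-- Source B's inner 'for L in lengths' loop: one lookup per distinct length, min-index hit kept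
def gpBest (tab : PySem.Dict String (Int × List (String × String))) (lengths : List Int)
    (pid : String) : Option (Int × List (String × String)) :=
  lengths.foldl
    (fun best L =>
      if L ≤ PySem.Str.len pid then
        match tab.get? (PySem.Str.slice pid none (some L)) with
        | some hit =>
          match best with
          | none => some hit
          | some b => if hit.1 < b.1 then some hit else best
        | none => best
      else best)
    none

def get_progress_alt (solved_list : List String) (problem_info : List (String × List (String × String))) : List (String × Int) :=
  let idx := gpIndex problem_info
  (solved_list.foldl
    (fun (counts : PySem.Dict String Int) pid =>
      match gpBest idx.1 idx.2 pid with
      | some best =>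
        match lookupTitle best.2 with
        | some t => counts.insert t (counts.getD t 0 + 1)
        | none => counts   -- Python raises KeyError here; outside Pre_
      | none => counts)
    PySem.Dict.empty).items

-- ===== PRECONDITION & SPEC =====
-- Pre_ excludes exactly the inputs on which Python A raises KeyError (and B raises it too):
-- some pid whose first matching prefix carries an info dict without the key "title".
def Pre_get_progress (solved_list : List String) (problem_info : List (String × List (String × String))) : Prop :=
  (solved_list.all (fun pid =>
    match problem_info.find? (fun e => PySem.Str.startswith pid e.1) with
    | some e => (lookupTitle e.2).isSome
    | none => true)) = true
instance (solved_list : List String) (problem_info : List (String × List (String × String))) : Decidable (Pre_get_progress solved_list problem_info) := by unfold Pre_get_progress; infer_instance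

def pvWitness_get_progress : List String × (List (String × List (String × String))) :=
  (["arr-1", "dp-3", "arr-2"], [("arr", [("title", "Arrays")]), ("dp", [("title", "DP")])])

def Spec_get_progress (solved_list : List String) (problem_info : List (String × List (String × String))) (out : List (String × Int)) : Prop := out = get_progress_alt solved_list problem_info
instance (solved_list : List String) (problem_info : List (String × List (String × String))) (out : List (String × Int)) : Decidable (Spec_get_progress solved_list problem_info out) := by unfold Spec_get_progress; infer_instance

-- ===== CLAIM (what is proved, stated in full; the proofs are below) =====
def Claim_equal_get_progress : Prop := ∀ (solved_list : List String) (problem_info : List (String × List (String × String))), Dom_get_progress solved_list problem_info → Pre_get_progress solved_list problem_info → Spec_get_progress solved_list problem_info (get_progress solved_list problem_info)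

-- ===== LEMMAS AND PROOFS =====

def updBest {β : Type} (best : Option (Int × β)) (hit? : Option (Int × β)) : Option (Int × β) :=
  match hit? with
  | none => best
  | some hit => match best with
    | none => some hit
    | some b => if hit.1 < b.1 then some hit else best

def minFold {β : Type} (h : List (Int × β)) (b : Option (Int × β)) : Option (Int × β) :=
  h.foldl (fun acc e => updBest acc (some e)) b

theorem minFold_some {β : Type} (h : List (Int × β)) (e : Int × β) :
    ∃ e', minFold h (some e) = some e' := by
  induction h generalizing e with
  | nil => exact ⟨e, rfl⟩
  | cons x t ih =>
    simp only [minFold, List.foldl_cons] at *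
    cases hx : updBest (some e) (some x) with
    | none => simp [updBest] at hx; split at hx <;> simp_all
    | some e' => exact ih e'

theorem updBest_some_of_lt {β : Type} (b x : Int × β) (h : x.1 < b.1 → False) :
    updBest (some b) (some x) = some b := by
  simp [updBest]; intro hx; exact absurd hx h

theorem minFold_mid' {β : Type} (t1 h2 : List (Int × β)) (e b : Int × β)
    (hlt : ∀ x ∈ t1, x.1 < e.1) (hb : b.1 < e.1) :
    minFold (t1 ++ e :: h2) (some b) = minFold (t1 ++ h2) (some b) := by
  induction t1 generalizing b with
  | nil =>
    simp only [List.nil_append, minFold, List.foldl_cons]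
    have : updBest (some b) (some e) = some b := updBest_some_of_lt _ _ (by omega)
    rw [this]
  | cons a t ih =>
    simp only [List.cons_append, minFold, List.foldl_cons] at *
    have ha : a.1 < e.1 := hlt a (by simp)
    cases hx : updBest (some b) (some a) with
    | none => simp [updBest] at hx; split at hx <;> simp_all
    | some b' =>
      have hb' : b'.1 < e.1 := by
        simp only [updBest] at hx
        split at hx <;> simp_all
      exact ih b' (fun x hx => hlt x (by simp [hx])) hb'

theorem minFold_mid {β : Type} (h1 h2 : List (Int × β)) (e : Int × β)
    (hlt : ∀ x ∈ h1 ++ h2, x.1 < e.1) (hne : h1 ++ h2 ≠ []) :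
    minFold (h1 ++ e :: h2) none = minFold (h1 ++ h2) none := by
  cases h1 with
  | nil =>
    cases h2 with
    | nil => simp at hne
    | cons y t =>
      simp only [List.nil_append, minFold, List.foldl_cons] at *
      show minFold t (updBest (updBest none (some e)) (some y)) = minFold t (updBest none (some y))
      have hy : y.1 < e.1 := hlt y (by simp)
      simp only [updBest]
      rw [if_pos hy]
  | cons a t =>
    simp only [List.cons_append, minFold, List.foldl_cons]
    show minFold (t ++ e :: h2) (some a) = minFold (t ++ h2) (some a)
    exact minFold_mid' t h2 e a (fun x hx => hlt x (by simp [List.mem_append] at hx ⊢; tauto))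
      (hlt a (by simp))

theorem map_snd_find?_enumerate {α : Type} (l : List α) (s : Int) (p : α → Bool) :
    ((PySem.List.enumerate l s).find? (fun e => p e.2)).map Prod.snd = l.find? p := by
  induction l generalizing s with
  | nil => rfl
  | cons x t ih =>
    rw [PySem.List.enumerate_cons]
    by_cases hp : p x
    · simp [List.find?_cons, hp]
    · simp only [List.find?_cons]
      simp [hp, ih]

def gHit (tab : PySem.Dict String (Int × List (String × String))) (pid : String) (L : Int) :
    Option (Int × List (String × String)) :=
  if L ≤ PySem.Str.len pid then tab.get? (PySem.Str.slice pid none (some L)) else none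

theorem gpBest_eq_minFold (tab : PySem.Dict String (Int × List (String × String)))
    (lens : List Int) (pid : String) :
    gpBest tab lens pid = minFold (lens.filterMap (gHit tab pid)) none := by
  have step : ∀ (b : Option (Int × List (String × String))) (L : Int),
      (if L ≤ PySem.Str.len pid then
        match tab.get? (PySem.Str.slice pid none (some L)) with
        | some hit =>
          match b with
          | none => some hit
          | some bb => if hit.1 < bb.1 then some hit else b
        | none => b
      else b) = updBest b (gHit tab pid L) := by
    intro b L
    by_cases hL : L ≤ PySem.Str.len pid
    · simp only [gHit, if_pos hL]
      cases tab.get? (PySem.Str.slice pid none (some L)) with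
      | none => rfl
      | some hit => cases b <;> rfl
    · simp only [gHit, if_neg hL]; rfl
  have main : ∀ (lens : List Int) (b : Option (Int × List (String × String))),
      lens.foldl (fun best L => updBest best (gHit tab pid L)) b
        = minFold (lens.filterMap (gHit tab pid)) b := by
    intro lens
    induction lens with
    | nil => intro b; rfl
    | cons L t ih =>
      intro b
      rw [List.foldl_cons, List.filterMap_cons]
      cases hg : gHit tab pid L with
      | none => simp only [hg]; simpa [updBest] using ih b
      | some e => simp only [hg, minFold, List.foldl_cons]; exact ih _
  calc gpBest tab lens pid
      = lens.foldl (fun best L => updBest best (gHit tab pid L)) none := by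
        unfold gpBest; exact PySem.List.foldl_congr_mem lens _ _ none (fun b L _ => step b L)
    _ = minFold (lens.filterMap (gHit tab pid)) none := main lens none

theorem slice_eq_key_iff (pid p : String) (L : Int) (h0 : 0 ≤ L) (hle : L ≤ PySem.Str.len pid) :
    (PySem.Str.slice pid none (some L) = p) ↔
      (L = PySem.Str.len p ∧ PySem.Str.startswith pid p = true) := by
  have hsl : (PySem.Str.slice pid none (some L)).toList = pid.toList.take L.toNat := by
    simp [PySem.Str.toList_slice, PySem.List.slice_to _ h0]
  have hlen : L.toNat ≤ pid.toList.length := by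
    rw [PySem.Str.len_eq] at hle; omega
  constructor
  · intro h
    have ht : pid.toList.take L.toNat = p.toList := by rw [← hsl, h]
    have hl : p.toList.length = L.toNat := by
      rw [← ht, List.length_take]; omega
    constructor
    · rw [PySem.Str.len_eq, hl]; omega
    · rw [PySem.Str.startswith_eq, PySem.Chars.startswith_iff, ← ht]
      exact List.take_prefix _ _
  · rintro ⟨hL, hsw⟩
    rw [PySem.Str.startswith_eq, PySem.Chars.startswith_iff] at hsw
    have hl : L.toNat = p.toList.length := by
      rw [PySem.Str.len_eq] at hL; omega
    apply String.toList_inj.mp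
    rw [hsl, hl]
    exact (List.prefix_iff_eq_take.mp hsw).symm

def fmE (problem_info : List (String × List (String × String))) (pid : String) :
    Option (Int × List (String × String)) :=
  ((PySem.List.enumerate problem_info 0).find? (fun e => PySem.Str.startswith pid e.2.1)).map
    (fun e => (e.1, e.2.2))

theorem minFold_none_iff {β : Type} (h : List (Int × β)) :
    minFold h none = none ↔ h = [] := by
  cases h with
  | nil => simp [minFold]
  | cons e t =>
    constructor
    · intro hm
      have : minFold (e :: t) none = minFold t (some e) := rfl
      rw [this] at hm
      obtain ⟨e', he'⟩ := minFold_some t e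
      simp [he'] at hm
    · intro h; simp at h

theorem gpIndex_append (l : List (String × List (String × String)))
    (x : String × List (String × String)) :
    gpIndex (l ++ [x]) =
      (if (gpIndex l).1.contains x.1 then gpIndex l
       else ((gpIndex l).1.insert x.1 ((l.length : Int), x.2),
             if (gpIndex l).2.contains (PySem.Str.len x.1) then (gpIndex l).2
             else (gpIndex l).2 ++ [PySem.Str.len x.1])) := by
  unfold gpIndex
  rw [PySem.List.enumerate_append, List.foldl_append]
  simp [PySem.List.enumerate_cons, PySem.List.enumerate]

theorem fmE_append (l : List (String × List (String × String)))
    (x : String × List (String × String)) (pid : String) :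
    fmE (l ++ [x]) pid =
      (fmE l pid).or
        (if PySem.Str.startswith pid x.1 then some ((l.length : Int), x.2) else none) := by
  unfold fmE
  rw [PySem.List.enumerate_append, List.find?_append, Option.map_or]
  congr 1
  have he : PySem.List.enumerate [x] (0 + (l.length : Int)) = [((l.length : Int), x)] := by
    simp [PySem.List.enumerate_cons, PySem.List.enumerate]
  rw [he]
  cases hs : PySem.Str.startswith pid x.1 <;> simp only [List.find?, hs] <;> rfl

theorem gpIndex_inv (l : List (String × List (String × String))) :
    (∀ q, (gpIndex l).1.contains q = true → q ∈ l.map Prod.fst) ∧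
    (∀ q v, (gpIndex l).1.get? q = some v →
        (PySem.Str.len q ∈ (gpIndex l).2 ∧ 0 ≤ v.1 ∧ v.1 < (l.length : Int))) ∧
    (gpIndex l).2.Nodup ∧ (∀ L ∈ (gpIndex l).2, 0 ≤ L) := by
  induction l using List.reverseRecOn with
  | nil =>
    refine ⟨?_, ?_, ?_, ?_⟩ <;> simp [gpIndex, PySem.List.enumerate]
  | append_singleton l x ih =>
    obtain ⟨i1, i2, i4, i5⟩ := ih
    rw [gpIndex_append]
    by_cases hc : (gpIndex l).1.contains x.1 = true
    · rw [if_pos hc]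
      refine ⟨fun q hq => by simp [i1 q hq], fun q v hv => ?_, i4, i5⟩
      obtain ⟨h1, h2, h3⟩ := i2 q v hv
      refine ⟨h1, h2, by simp; omega⟩
    · rw [if_neg hc]
      refine ⟨?_, ?_, ?_, ?_⟩
      · intro q hq
        simp only [PySem.Dict.contains_insert] at hq
        rcases Bool.or_eq_true_iff.mp hq with h | h
        · simp [eq_of_beq h]
        · simp [i1 q h]
      · intro q v hv
        rw [PySem.Dict.get?_insert] at hv
        by_cases hqx : q = x.1
        · rw [if_pos hqx] at hv
          have hvv : v = ((l.length : Int), x.2) := by simpa using hv.symm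
          subst hqx hvv
          refine ⟨?_, by simp, by simp⟩
          split
          · next hcon => exact List.mem_of_elem_eq_true hcon
          · simp
        · rw [if_neg hqx] at hv
          obtain ⟨h1, h2, h3⟩ := i2 q v hv
          refine ⟨?_, h2, by simp; omega⟩
          split
          · exact h1
          · exact List.mem_append.mpr (Or.inl h1)
      · split
        · exact i4
        · next hcon =>
          have hnm : PySem.Str.len x.1 ∉ (gpIndex l).2 := by
            intro hm
            exact absurd (List.elem_eq_true_of_mem hm) (by simpa using hcon)
          refine List.nodup_append.mpr ⟨i4, List.nodup_singleton _, ?_⟩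
          intro a ha b hb
          simp at hb
          subst hb
          intro h; subst h; exact hnm ha
      · intro L hL
        have hx0 : (0:Int) ≤ PySem.Str.len x.1 := by rw [PySem.Str.len_eq]; positivity
        split at hL
        · exact i5 L hL
        · rcases List.mem_append.mp hL with h | h
          · exact i5 L h
          · simp at h; omega

theorem gHit_insert_ne (tab : PySem.Dict String (Int × List (String × String)))
    (pid p : String) (nv : Int × List (String × String)) (L : Int) (h0 : 0 ≤ L)
    (hne : L = PySem.Str.len p → False) :
    gHit (tab.insert p nv) pid L = gHit tab pid L := by
  unfold gHit
  by_cases hL : L ≤ PySem.Str.len pid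
  · rw [if_pos hL, if_pos hL, PySem.Dict.get?_insert, if_neg]
    intro heq
    exact hne ((slice_eq_key_iff pid p L h0 hL).mp heq).1
  · rw [if_neg hL, if_neg hL]

theorem gHit_insert_nosw (tab : PySem.Dict String (Int × List (String × String)))
    (pid p : String) (nv : Int × List (String × String)) (L : Int) (h0 : 0 ≤ L)
    (hsw : PySem.Str.startswith pid p = false) :
    gHit (tab.insert p nv) pid L = gHit tab pid L := by
  unfold gHit
  by_cases hL : L ≤ PySem.Str.len pid
  · rw [if_pos hL, if_pos hL, PySem.Dict.get?_insert, if_neg]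
    intro heq
    have := ((slice_eq_key_iff pid p L h0 hL).mp heq).2
    rw [this] at hsw; exact Bool.noConfusion hsw
  · rw [if_neg hL, if_neg hL]

theorem mem_filterMap_gHit (tab : PySem.Dict String (Int × List (String × String)))
    (pid : String) (lens : List Int) (y : Int × List (String × String))
    (hy : y ∈ lens.filterMap (gHit tab pid)) : ∃ s, tab.get? s = some y := by
  obtain ⟨L, _, hg⟩ := List.mem_filterMap.mp hy
  unfold gHit at hg
  split at hg
  · exact ⟨_, hg⟩
  · simp at hg

theorem len_le_of_startswith (pid p : String) (h : PySem.Str.startswith pid p = true) :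
    PySem.Str.len p ≤ PySem.Str.len pid := by
  rw [PySem.Str.startswith_eq, PySem.Chars.startswith_iff] at h
  rw [PySem.Str.len_eq, PySem.Str.len_eq]
  exact_mod_cast h.length_le

theorem slice_key_self (pid p : String) (h : PySem.Str.startswith pid p = true) :
    PySem.Str.slice pid none (some (PySem.Str.len p)) = p := by
  have h0 : (0:Int) ≤ PySem.Str.len p := by rw [PySem.Str.len_eq]; positivity
  exact (slice_eq_key_iff pid p _ h0 (len_le_of_startswith pid p h)).mpr ⟨rfl, h⟩

theorem len_slice (pid : String) (L : Int) (h0 : 0 ≤ L) (hle : L ≤ PySem.Str.len pid) :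
    PySem.Str.len (PySem.Str.slice pid none (some L)) = L := by
  have hsl : (PySem.Str.slice pid none (some L)).toList = pid.toList.take L.toNat := by
    simp [PySem.Str.toList_slice, PySem.List.slice_to _ h0]
  rw [PySem.Str.len_eq] at hle ⊢
  rw [hsl, List.length_take]
  omega

theorem minFold_or {β : Type} (A B : List (Int × β)) (e : Int × β)
    (hb : ∀ y ∈ A ++ B, y.1 < e.1) :
    minFold (A ++ e :: B) none = (minFold (A ++ B) none).or (some e) := by
  cases hmf : minFold (A ++ B) none with
  | none =>
    obtain ⟨hA, hB⟩ := List.append_eq_nil_iff.mp ((minFold_none_iff _).mp hmf)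
    subst hA hB
    rfl
  | some b =>
    rw [minFold_mid A B e hb (by intro h; rw [h] at hmf; simp [minFold] at hmf), hmf]
    rfl

theorem step_insert (tab : PySem.Dict String (Int × List (String × String)))
    (lens : List Int) (pid p : String) (inf : List (String × String)) (n : Int)
    (i2 : ∀ q v, tab.get? q = some v → (PySem.Str.len q ∈ lens ∧ 0 ≤ v.1 ∧ v.1 < n))
    (i4 : lens.Nodup) (i5 : ∀ L ∈ lens, 0 ≤ L)
    (hget : tab.get? p = none) :
    minFold ((if lens.contains (PySem.Str.len p) = true then lens
              else lens ++ [PySem.Str.len p]).filterMap (gHit (tab.insert p (n, inf)) pid)) none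
      = (minFold (lens.filterMap (gHit tab pid)) none).or
          (if PySem.Str.startswith pid p = true then some (n, inf) else none) := by
  have h0p : (0:Int) ≤ PySem.Str.len p := by rw [PySem.Str.len_eq]; positivity
  cases hs : PySem.Str.startswith pid p with
  | false =>
    rw [show (if false = true then some (n, inf) else (none : Option (Int × List (String × String)))) = none from rfl, Option.or_none]
    have hcong : ∀ L ∈ lens, gHit (tab.insert p (n, inf)) pid L = gHit tab pid L :=
      fun L hL => gHit_insert_nosw tab pid p (n, inf) L (i5 L hL) hs
    by_cases hcon : lens.contains (PySem.Str.len p) = true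
    · rw [if_pos hcon, List.filterMap_congr hcong]
    · rw [if_neg hcon, List.filterMap_append, List.filterMap_congr hcong]
      have hnew : gHit (tab.insert p (n, inf)) pid (PySem.Str.len p) = none := by
        unfold gHit
        by_cases hL : PySem.Str.len p ≤ PySem.Str.len pid
        · rw [if_pos hL, PySem.Dict.get?_insert, if_neg]
          · cases hgv : tab.get? (PySem.Str.slice pid none (some (PySem.Str.len p))) with
            | none => rfl
            | some v =>
              have hmem := (i2 _ v hgv).1
              rw [len_slice pid _ h0p hL] at hmem
              exact absurd (List.elem_eq_true_of_mem hmem) (by simpa using hcon)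
          · intro heq
            have := ((slice_eq_key_iff pid p _ h0p hL).mp heq).2
            rw [this] at hs; exact Bool.noConfusion hs
        · rw [if_neg hL]
      have hemp : List.filterMap (gHit (tab.insert p (n, inf)) pid) [PySem.Str.len p] = [] := by
        rw [List.filterMap_cons, hnew]; rfl
      rw [hemp, List.append_nil]
  | true =>
    rw [show (if true = true then some (n, inf) else (none : Option (Int × List (String × String)))) = some (n, inf) from rfl]
    have hL : PySem.Str.len p ≤ PySem.Str.len pid := len_le_of_startswith pid p hs
    have hgnew : gHit (tab.insert p (n, inf)) pid (PySem.Str.len p) = some (n, inf) := by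
      unfold gHit
      rw [if_pos hL, slice_key_self pid p hs, PySem.Dict.get?_insert, if_pos rfl]
    have hgold : gHit tab pid (PySem.Str.len p) = none := by
      unfold gHit
      rw [if_pos hL, slice_key_self pid p hs, hget]
    have hbound : ∀ y ∈ lens.filterMap (gHit tab pid), y.1 < n := by
      intro y hy
      obtain ⟨s, hsv⟩ := mem_filterMap_gHit _ _ _ _ hy
      exact (i2 s y hsv).2.2
    by_cases hcon : lens.contains (PySem.Str.len p) = true
    · obtain ⟨u, v, huv⟩ := List.append_of_mem (List.mem_of_elem_eq_true hcon)
      subst huv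
      have hnu : PySem.Str.len p ∉ u := by
        have := List.disjoint_of_nodup_append i4
        intro hm; exact this hm (by simp)
      have hnv : PySem.Str.len p ∉ v := by
        have := (List.nodup_append.mp i4).2.1
        simpa using (List.nodup_cons.mp this).1
      rw [if_pos hcon]
      have hcu : ∀ L ∈ u, gHit (tab.insert p (n, inf)) pid L = gHit tab pid L := by
        intro L hLm
        exact gHit_insert_ne tab pid p (n, inf) L (i5 L (by simp [hLm]))
          (fun h => hnu (h ▸ hLm))
      have hcv : ∀ L ∈ v, gHit (tab.insert p (n, inf)) pid L = gHit tab pid L := by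
        intro L hLm
        exact gHit_insert_ne tab pid p (n, inf) L (i5 L (by simp [hLm]))
          (fun h => hnv (h ▸ hLm))
      simp only [List.filterMap_append, List.filterMap_cons, hgnew, hgold,
        List.filterMap_congr hcu, List.filterMap_congr hcv]
      exact minFold_or _ _ _ (by
        intro y hy
        apply hbound
        simp only [List.filterMap_append, List.filterMap_cons, hgold]
        exact hy)
    · rw [if_neg hcon, List.filterMap_append]
      have hcu : ∀ L ∈ lens, gHit (tab.insert p (n, inf)) pid L = gHit tab pid L := by
        intro L hLm
        refine gHit_insert_ne tab pid p (n, inf) L (i5 L hLm) (fun h => ?_)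
        exact absurd (List.elem_eq_true_of_mem (h ▸ hLm)) (by simpa using hcon)
      rw [List.filterMap_congr hcu, List.filterMap_cons, hgnew]
      have : lens.filterMap (gHit tab pid) ++ (n, inf) :: List.filterMap (gHit (tab.insert p (n, inf)) pid) []
          = lens.filterMap (gHit tab pid) ++ (n, inf) :: [] := by simp
      rw [this]
      have := minFold_or (lens.filterMap (gHit tab pid)) [] (n, inf)
        (by intro y hy; exact hbound y (by simpa using hy))
      simpa using this

theorem gpBest_eq_fmE (l : List (String × List (String × String))) (pid : String) :
    gpBest (gpIndex l).1 (gpIndex l).2 pid = fmE l pid := by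
  induction l using List.reverseRecOn with
  | nil => rfl
  | append_singleton l x ih =>
    obtain ⟨i1, i2, i4, i5⟩ := gpIndex_inv l
    rw [gpIndex_append, fmE_append]
    by_cases hc : (gpIndex l).1.contains x.1 = true
    · rw [if_pos hc, ih]
      cases hs : PySem.Str.startswith pid x.1 with
      | false => simp
      | true =>
        obtain ⟨e, he, hfst⟩ := List.mem_map.mp (i1 x.1 hc)
        have hfind : (l.find? (fun e => PySem.Str.startswith pid e.1)).isSome :=
          List.find?_isSome.mpr ⟨e, he, by rw [hfst]; exact hs⟩
        rw [← map_snd_find?_enumerate l 0] at hfind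
        have hsome : (fmE l pid).isSome := by
          unfold fmE
          simpa [Option.isSome_map] using hfind
        obtain ⟨w, hw⟩ := Option.isSome_iff_exists.mp hsome
        rw [hw]; rfl
    · rw [if_neg hc]
      have hget : (gpIndex l).1.get? x.1 = none :=
        (PySem.Dict.get?_eq_none_iff_contains _ _).mpr (by simpa using hc)
      have step := step_insert (gpIndex l).1 (gpIndex l).2 pid x.1 x.2 (l.length : Int)
        (fun q v hv => i2 q v hv) i4 i5 hget
      calc gpBest ((gpIndex l).1.insert x.1 ((l.length : Int), x.2), if (gpIndex l).2.contains (PySem.Str.len x.1) = true then (gpIndex l).2 else (gpIndex l).2 ++ [PySem.Str.len x.1]).1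
            ((gpIndex l).1.insert x.1 ((l.length : Int), x.2), if (gpIndex l).2.contains (PySem.Str.len x.1) = true then (gpIndex l).2 else (gpIndex l).2 ++ [PySem.Str.len x.1]).2 pid
          = minFold ((if (gpIndex l).2.contains (PySem.Str.len x.1) = true then (gpIndex l).2
              else (gpIndex l).2 ++ [PySem.Str.len x.1]).filterMap
                (gHit ((gpIndex l).1.insert x.1 ((l.length : Int), x.2)) pid)) none := by
            exact gpBest_eq_minFold _ _ _
        _ = (minFold ((gpIndex l).2.filterMap (gHit (gpIndex l).1 pid)) none).or
              (if PySem.Str.startswith pid x.1 = true then some ((l.length : Int), x.2) else none) := step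
        _ = (fmE l pid).or
              (if PySem.Str.startswith pid x.1 = true then some ((l.length : Int), x.2) else none) := by
            rw [← gpBest_eq_minFold, ih]

theorem final_eq (solved_list : List String) (problem_info : List (String × List (String × String))) :
    get_progress solved_list problem_info = get_progress_alt solved_list problem_info := by
  unfold get_progress get_progress_alt
  congr 1
  apply PySem.List.foldl_congr_mem
  intro counts pid _
  rw [gpBest_eq_fmE]
  unfold get_progress_stepA fmE
  cases hf : (PySem.List.enumerate problem_info 0).find?
      (fun e => PySem.Str.startswith pid e.2.1) with
  | none =>
    have hA : problem_info.find? (fun e => PySem.Str.startswith pid e.1) = none := by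
      rw [← map_snd_find?_enumerate problem_info 0, hf]; rfl
    rw [hA]; rfl
  | some w =>
    have hA : problem_info.find? (fun e => PySem.Str.startswith pid e.1) = some w.2 := by
      rw [← map_snd_find?_enumerate problem_info 0, hf]; rfl
    rw [hA]; rfl

-- ===== VERDICT (by name: the statement is the Claim_ definition above) =====
theorem get_progress_spec : Claim_equal_get_progress := by
  intro solved_list problem_info _ _
  unfold Spec_get_progress
  exact final_eq solved_list problem_info
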